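-- pv_equiv track=rewrite | github.com/Glasspham/Summary_exercises | Bai_94/main.py | good_positions
-- ===== SOURCE A (Python) =====
-- def good_positions(n, a):
--     cnt = 0
--     for j in range(n):
--         if a[j] <= 0: continue
--         sum = 0
--         good = True
--         for k in range(n):
--             sum += a[(j + k) % n]
--             if sum <= 0:
--                 good = False
--                 break
--         if good:
--             cnt += 1
--
--     return cnt
-- ===== SOURCE B (Python) =====
-- def good_positions(n, a):
--     # O(n) via prefix sums + suffix/prefix minima (A is O(n^2))
--     if n <= 0:
--         return 0
--     xs = a[:n]
--     P = [0]
--     for x in xs: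
--         P.append(P[-1] + x)
--     S = P[n]
--     # suf[j] (after reverse) = min(P[j+1..n]) for j in 0..n-1
--     suf = [P[n]]
--     for i in range(n - 1, 0, -1):
--         suf.append(min(P[i], suf[-1]))
--     suf.reverse()
--     cnt = 0
--     pre = 0  # min(P[1..j]); value unused at j == 0
--     for j in range(n):
--         if suf[j] > P[j] and (j == 0 or S + pre > P[j]):
--             cnt += 1
--         pre = P[j + 1] if j == 0 else min(pre, P[j + 1])
--     return cnt
-- ===== Notes on version B (the rewrite author's own statement) =====
-- stated objective: faster
-- what changed: replaced the per-start circular rescan with one prefix-sum pass plus precomputed suffix/prefix minima, so each start is judged in O(1)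
import Mathlib
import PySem

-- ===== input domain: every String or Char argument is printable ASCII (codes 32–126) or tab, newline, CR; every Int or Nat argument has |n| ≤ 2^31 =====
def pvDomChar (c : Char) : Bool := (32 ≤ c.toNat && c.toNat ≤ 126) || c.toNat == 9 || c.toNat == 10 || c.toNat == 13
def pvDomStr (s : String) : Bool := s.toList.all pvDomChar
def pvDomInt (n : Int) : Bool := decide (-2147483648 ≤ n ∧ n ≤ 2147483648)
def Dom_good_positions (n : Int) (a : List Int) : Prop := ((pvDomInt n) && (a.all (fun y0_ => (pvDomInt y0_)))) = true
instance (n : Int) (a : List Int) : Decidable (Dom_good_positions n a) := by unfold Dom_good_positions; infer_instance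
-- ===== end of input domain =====

-- B replaces A's O(n^2) per-start circular rescan by one prefix-sum pass with
-- precomputed suffix/prefix minima, judging each start in O(1) (asymptotically faster).

-- ===== PORT A =====
-- a[i] ported as pyGetD _ _ 0; exact under Pre_ (every index taken is in range there).
def gpGet (a : List Int) (i : Int) : Int := PySem.List.pyGetD a i 0

-- inner 'for k in range(n)' with break, state = running sum
def gpInner (n : Int) (a : List Int) (j : Int) : List Int → Int → Bool
  | [], _ => true
  | k :: ks, s =>
    let s' := s + gpGet a (PySem.Int.mod (j + k) n)
    if s' ≤ 0 then false else gpInner n a j ks s'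

def good_positions (n : Int) (a : List Int) : Int :=
  (PySem.List.pyRange 0 n 1).foldl (fun cnt j =>
    if gpGet a j ≤ 0 then cnt
    else if gpInner n a j (PySem.List.pyRange 0 n 1) 0 then cnt + 1 else cnt) 0

-- ===== PORT B =====
def good_positions_alt (n : Int) (a : List Int) : Int :=
  if n ≤ 0 then 0
  else
    let xs := PySem.List.slice a none (some n)
    let P := xs.foldl (fun P x => P ++ [PySem.List.pyGetD P (-1) 0 + x]) [0]
    let S := PySem.List.pyGetD P n 0
    let suf0 := (PySem.List.pyRange (n - 1) 0 (-1)).foldl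
        (fun suf i => suf ++ [min (PySem.List.pyGetD P i 0) (PySem.List.pyGetD suf (-1) 0)]) [S]
    let suf := suf0.reverse
    let res := (PySem.List.pyRange 0 n 1).foldl
      (fun (st : Int × Int) j =>
        let cnt := if PySem.List.pyGetD P j 0 < PySem.List.pyGetD suf j 0 ∧
                      (j = 0 ∨ PySem.List.pyGetD P j 0 < S + st.2) then st.1 + 1 else st.1
        let pre := if j = 0 then PySem.List.pyGetD P (j + 1) 0
                   else min st.2 (PySem.List.pyGetD P (j + 1) 0)
        (cnt, pre)) ((0 : Int), (0 : Int))
    res.1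

-- ===== PRECONDITION & SPEC =====
-- Pre_ excludes exactly the inputs where A raises IndexError: n larger than len(a)
-- (then some a[j] with j up to n-1 is out of range and A always reaches it).
def Pre_good_positions (n : Int) (a : List Int) : Prop := n ≤ (a.length : Int)
instance (n : Int) (a : List Int) : Decidable (Pre_good_positions n a) := by unfold Pre_good_positions; infer_instance
def pvWitness_good_positions : Int × List Int := (3, [2, -1, 3])

def Spec_good_positions (n : Int) (a : List Int) (out : Int) : Prop := out = good_positions_alt n a
instance (n : Int) (a : List Int) (out : Int) : Decidable (Spec_good_positions n a out) := by unfold Spec_good_positions; infer_instance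

-- ===== CLAIM (what is proved, stated in full; the proofs are below) =====
def Claim_equal_good_positions : Prop := ∀ (n : Int) (a : List Int), Dom_good_positions n a → Pre_good_positions n a → Spec_good_positions n a (good_positions n a)

-- ===== LEMMAS AND PROOFS =====

-- prefix sum of the first i elements
def pvPsum (xs : List Int) (i : Nat) : Int := ((xs.take i).sum)

-- circular window sum: m elements starting at j
def pvT (xs : List Int) (j m : Nat) : Int :=
  ((List.range m).map (fun k => xs.getD ((j + k) % xs.length) 0)).sum

def pvAgood (xs : List Int) (j : Nat) : Prop :=
  ∀ m, 1 ≤ m → m ≤ xs.length → 0 < pvT xs j m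

-- suffix-minimum chain: pvG xs t = min of pvPsum over [len-t, len]
def pvG (xs : List Int) : Nat → Int
  | 0 => pvPsum xs xs.length
  | t + 1 => min (pvPsum xs (xs.length - (t + 1))) (pvG xs t)

-- prefix-minimum chain, as the loop maintains it (pvH xs 0 = the unused init 0)
def pvH (xs : List Int) : Nat → Int
  | 0 => 0
  | m + 1 => if m = 0 then pvPsum xs 1 else min (pvH xs m) (pvPsum xs (m + 1))

-- the per-element list B's first loop appends
def pvPartial (s : Int) : List Int → List Int
  | [] => []
  | x :: ys => (s + x) :: pvPartial (s + x) ys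

def pvBcond (xs : List Int) (j : Nat) : Prop :=
  pvPsum xs j < pvG xs (xs.length - 1 - j) ∧
  (j = 0 ∨ pvPsum xs j < pvPsum xs xs.length + pvH xs j)

-- Bool forms (bounded quantifier as List.all), to use with countP
def pvAgoodB (xs : List Int) (j : Nat) : Bool :=
  (List.range xs.length).all (fun m => decide (0 < pvT xs j (m + 1)))

def pvBcondB (xs : List Int) (j : Nat) : Bool :=
  decide (pvPsum xs j < pvG xs (xs.length - 1 - j)) &&
  (decide (j = 0) || decide (pvPsum xs j < pvPsum xs xs.length + pvH xs j))

theorem pvAgoodB_iff (xs : List Int) (j : Nat) : pvAgoodB xs j = true ↔ pvAgood xs j := by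
  unfold pvAgoodB pvAgood
  simp [List.all_eq_true]
  constructor
  · intro h m h1 h2
    have := h (m - 1) (by omega)
    have hm : m - 1 + 1 = m := by omega
    rwa [hm] at this
  · intro h m hm
    exact h (m + 1) (by omega) (by omega)

theorem pvBcondB_iff (xs : List Int) (j : Nat) : pvBcondB xs j = true ↔ pvBcond xs j := by
  unfold pvBcondB pvBcond
  simp

theorem pv_getD_take (a : List Int) (N i : Nat) (h : i < N) :
    (a.take N).getD i 0 = a.getD i 0 := by
  rw [List.getD_eq_getElem?_getD, List.getD_eq_getElem?_getD, List.getElem?_take_of_lt h]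

theorem pv_inner_iff (n : Int) (a : List Int) (j : Int) :
    ∀ (ks : List Int) (s : Int),
      (gpInner n a j ks s = true ↔
        ∀ m, 1 ≤ m → m ≤ ks.length →
          0 < s + ((ks.take m).map (fun k => gpGet a (PySem.Int.mod (j + k) n))).sum) := by
  intro ks
  induction ks with
  | nil =>
    intro s
    simp only [gpInner, List.length_nil]
    constructor
    · intro _ m h1 h2; omega
    · intro _; trivial
  | cons k ks ih =>
    intro s
    by_cases hs : s + gpGet a (PySem.Int.mod (j + k) n) ≤ 0
    · simp only [gpInner, if_pos hs]
      constructor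
      · intro h; exact absurd h (by simp)
      · intro h
        have := h 1 (by omega) (by simp)
        simp only [List.take_succ_cons, List.take_zero, List.map_cons, List.map_nil,
          List.sum_cons, List.sum_nil, add_zero] at this
        omega
    · simp only [gpInner, if_neg hs]
      rw [ih (s + gpGet a (PySem.Int.mod (j + k) n))]
      constructor
      · intro h m h1 h2
        match m with
        | 1 =>
          simp only [List.take_succ_cons, List.take_zero, List.map_cons, List.map_nil,
            List.sum_cons, List.sum_nil, add_zero]
          omega
        | mm + 2 =>
          have := h (mm + 1) (by omega) (by simp at h2; omega)
          simp only [List.take_succ_cons, List.map_cons, List.sum_cons]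
          omega
      · intro h m h1 h2
        have := h (m + 1) (by omega) (by simp; omega)
        simp only [List.take_succ_cons, List.map_cons, List.sum_cons] at this
        omega

theorem pv_foldl_count {α : Type} (f : α → Int) (g : α → Bool) :
    ∀ (l : List α) (c : Int),
      l.foldl (fun c j => if f j ≤ 0 then c else if g j then c + 1 else c) c
        = c + ((l.countP (fun j => !decide (f j ≤ 0) && g j) : Nat) : Int) := by
  intro l
  induction l with
  | nil => intro c; simp
  | cons x l ih =>
    intro c
    simp only [List.foldl_cons, List.countP_cons]
    by_cases hf : f x ≤ 0
    · simp only [if_pos hf, ih, hf, decide_true, Bool.not_true, Bool.false_and]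
      simp
    · by_cases hg : g x = true
      · simp only [if_neg hf, hg, if_pos hg, ih, hf, decide_false, Bool.not_false,
          Bool.true_and]
        push_cast
        ring
      · simp only [if_neg hf, hg, if_neg (by simp [hg] : ¬ g x = true), ih, hf, decide_false,
          Bool.not_false, Bool.true_and]
        simp [hg]

theorem pv_A_pred (n : Int) (a : List Int) (h0 : 0 < n) (hl : n ≤ (a.length : Int))
    (j : Nat) (hj : j < n.toNat) :
    ((!decide (gpGet a (j : Int) ≤ 0) && gpInner n a (j : Int) (PySem.List.pyRange 0 n 1) 0) = true
      ↔ pvAgood (a.take n.toNat) j) := by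
  have hN : n = ((n.toNat : Nat) : Int) := by omega
  have hNl : n.toNat ≤ a.length := by omega
  have hlen : (a.take n.toNat).length = n.toNat := by rw [List.length_take]; omega
  have hsum : ∀ m, m ≤ n.toNat →
      (((PySem.List.pyRange 0 n 1).take m).map
        (fun k => gpGet a (PySem.Int.mod ((j : Int) + k) n))).sum
      = pvT (a.take n.toNat) j m := by
    intro m hm
    rw [PySem.List.pyRange_one 0 n]
    simp only [sub_zero, zero_add, List.map_take, List.map_map, ← List.map_take,
      List.take_range]
    have hmin : min m n.toNat = m := by omega
    rw [hmin]
    unfold pvT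
    rw [hlen]
    refine congrArg _ (List.map_congr_left ?_)
    intro k hk
    simp only [List.mem_range] at hk
    simp only [Function.comp_apply]
    have hc : (j : Int) + (k : Int) = ((j + k : Nat) : Int) := by push_cast; ring
    have hmod : PySem.Int.mod ((j + k : Nat) : Int) n = (((j + k) % n.toNat : Nat) : Int) := by
      conv_lhs => rw [hN]
      rw [PySem.Int.mod_natCast]
    rw [hc, hmod]
    unfold gpGet
    rw [PySem.List.pyGetD_natCast]
    exact (pv_getD_take a n.toNat ((j + k) % n.toNat) (Nat.mod_lt _ (by omega))).symm
  have hlen_rng : (PySem.List.pyRange 0 n 1).length = n.toNat := by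
    rw [PySem.List.length_pyRange_one]; congr 1; omega
  rw [Bool.and_eq_true, Bool.not_eq_eq_eq_not, Bool.not_true, decide_eq_false_iff_not]
  rw [pv_inner_iff n a (j : Int) (PySem.List.pyRange 0 n 1) 0]
  unfold pvAgood
  rw [hlen]
  have hguard : gpGet a (j : Int) = (a.take n.toNat).getD j 0 := by
    unfold gpGet
    rw [PySem.List.pyGetD_natCast, pv_getD_take a n.toNat j (by omega)]
  constructor
  · intro ⟨hg, hin⟩ m h1 h2
    have := hin m h1 (by omega)
    rw [hsum m h2] at this
    omega
  · intro h
    constructor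
    · have h1 := h 1 (by omega) (by omega)
      unfold pvT at h1
      simp only [List.range_one, List.map_cons, List.map_nil, List.sum_cons, List.sum_nil,
        add_zero] at h1
      rw [hlen, Nat.mod_eq_of_lt (by omega)] at h1
      rw [hguard]
      omega
    · intro m h1 h2
      rw [hlen_rng] at h2
      rw [hsum m h2]
      have := h m h1 (by omega)
      omega

theorem pv_A_eq_count (n : Int) (a : List Int) (h0 : 0 < n) (hl : n ≤ (a.length : Int)) :
    good_positions n a =
      (((List.range n.toNat).countP (fun j => pvAgoodB (a.take n.toNat) j) : Nat) : Int) := by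
  have hrw : PySem.List.pyRange 0 n 1 = (List.range n.toNat).map (fun k : Nat => (k : Int)) := by
    rw [PySem.List.pyRange_one]; simp only [sub_zero, zero_add]
  unfold good_positions
  rw [pv_foldl_count (fun j : Int => gpGet a j)
    (fun j : Int => gpInner n a j (PySem.List.pyRange 0 n 1) 0), zero_add]
  rw [hrw, List.countP_map]
  congr 1
  refine List.countP_congr ?_
  intro j hj
  simp only [List.mem_range] at hj
  simp only [Function.comp_apply]
  rw [← hrw]
  exact (pv_A_pred n a h0 hl j hj).trans (pvAgoodB_iff (a.take n.toNat) j).symm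

theorem pv_psum_cons (x : Int) (ys : List Int) (m : Nat) :
    pvPsum (x :: ys) (m + 1) = x + pvPsum ys m := by
  simp [pvPsum]

theorem pv_foldP (ys : List Int) :
    ∀ (acc : List Int) (h : acc ≠ []),
      ys.foldl (fun P x => P ++ [PySem.List.pyGetD P (-1) 0 + x]) acc
        = acc ++ pvPartial (acc.getLast h) ys := by
  induction ys with
  | nil => intro acc h; simp [pvPartial]
  | cons x ys ih =>
    intro acc h
    simp only [List.foldl_cons]
    rw [PySem.List.pyGetD_neg_one acc 0 h]
    rw [ih (acc ++ [acc.getLast h + x]) (by simp)]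
    rw [List.getLast_concat]
    simp only [pvPartial, List.append_assoc, List.singleton_append]

theorem pv_partial_getD (ys : List Int) :
    ∀ (s : Int) (i : Nat), i < ys.length →
      (pvPartial s ys).getD i 0 = s + pvPsum ys (i + 1) := by
  induction ys with
  | nil => intro s i h; simp at h
  | cons x ys ih =>
    intro s i h
    match i with
    | 0 => simp [pvPartial, pvPsum]
    | i + 1 =>
      simp only [pvPartial, List.getD_cons_succ]
      rw [ih (s + x) i (by simpa using h), pv_psum_cons]
      ring

theorem pv_P_getD (xs : List Int) (i : Nat) (hi : i ≤ xs.length) :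
    PySem.List.pyGetD (0 :: pvPartial 0 xs) (i : Int) 0 = pvPsum xs i := by
  rw [PySem.List.pyGetD_natCast]
  match i with
  | 0 => simp [pvPsum]
  | i + 1 =>
    simp only [List.getD_cons_succ]
    rw [pv_partial_getD xs 0 i (by omega)]
    ring

theorem pv_suf0_build (xs : List Int) (h0 : 0 < xs.length) (P : List Int)
    (hP : ∀ i, i ≤ xs.length → PySem.List.pyGetD P (i : Int) 0 = pvPsum xs i) :
    (PySem.List.pyRange ((xs.length : Int) - 1) 0 (-1)).foldl
        (fun suf i => suf ++ [min (PySem.List.pyGetD P i 0) (PySem.List.pyGetD suf (-1) 0)])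
        [pvPsum xs xs.length]
      = (List.range xs.length).map (pvG xs) := by
  rw [PySem.List.pyRange_neg_one, List.foldl_map]
  have key : ∀ t, t ≤ xs.length - 1 →
      (List.range t).foldl
        (fun suf (k : Nat) => suf ++
          [min (PySem.List.pyGetD P ((xs.length : Int) - 1 - (k : Int)) 0)
               (PySem.List.pyGetD suf (-1) 0)])
        [pvPsum xs xs.length]
      = (List.range (t + 1)).map (pvG xs) := by
    intro t
    induction t with
    | zero => intro _; simp [pvG]
    | succ t ih =>
      intro ht
      rw [List.range_succ, List.foldl_append, ih (by omega)]
      simp only [List.foldl_cons, List.foldl_nil]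
      have hidx : (xs.length : Int) - 1 - (t : Int) = ((xs.length - 1 - t : Nat) : Int) := by
        push_cast; omega
      rw [hidx, hP (xs.length - 1 - t) (by omega)]
      have hne : (List.range (t + 1)).map (pvG xs) ≠ [] := by simp
      rw [PySem.List.pyGetD_neg_one _ 0 hne]
      have hlast : ((List.range (t + 1)).map (pvG xs)).getLast hne = pvG xs t := by
        rw [List.getLast_eq_getElem]
        simp
      rw [hlast]
      rw [List.range_succ (n := t + 1), List.map_append]
      simp only [List.map_cons, List.map_nil]
      congr 2
      show min (pvPsum xs (xs.length - 1 - t)) (pvG xs t) = pvG xs (t + 1)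
      simp only [pvG]
      congr 2
      omega
    -- end key
  have h1 : ((xs.length : Int) - 1 - 0).toNat = xs.length - 1 := by omega
  rw [h1, key (xs.length - 1) (by omega)]
  congr 2
  omega

theorem pv_suf_getD (xs : List Int) (j : Nat) (hj : j < xs.length) :
    PySem.List.pyGetD ((List.range xs.length).map (pvG xs)).reverse (j : Int) 0
      = pvG xs (xs.length - 1 - j) := by
  rw [PySem.List.pyGetD_natCast, List.getD_eq_getElem?_getD]
  have hlen : ((List.range xs.length).map (pvG xs)).reverse.length = xs.length := by simp
  rw [List.getElem?_eq_getElem (by omega)]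
  simp only [Option.getD_some]
  rw [List.getElem_reverse]
  simp only [List.getElem_map, List.getElem_range]
  congr 1
  simp

theorem pv_loopB (xs : List Int) (P suf : List Int) (S : Int)
    (hS : S = pvPsum xs xs.length)
    (hP : ∀ i, i ≤ xs.length → PySem.List.pyGetD P (i : Int) 0 = pvPsum xs i)
    (hsuf : ∀ j, j < xs.length → PySem.List.pyGetD suf (j : Int) 0 = pvG xs (xs.length - 1 - j)) :
    ∀ t, t ≤ xs.length →
      ((List.range t).map (fun k : Nat => (k : Int))).foldl
        (fun (st : Int × Int) j =>
          (if PySem.List.pyGetD P j 0 < PySem.List.pyGetD suf j 0 ∧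
                (j = 0 ∨ PySem.List.pyGetD P j 0 < S + st.2) then st.1 + 1 else st.1,
           if j = 0 then PySem.List.pyGetD P (j + 1) 0
           else min st.2 (PySem.List.pyGetD P (j + 1) 0))) ((0 : Int), (0 : Int))
      = ((((List.range t).countP (fun j => pvBcondB xs j) : Nat) : Int), pvH xs t) := by
  intro t
  induction t with
  | zero => simp [pvH]
  | succ t ih =>
    intro ht
    rw [List.range_succ, List.map_append, List.foldl_append, ih (by omega)]
    simp only [List.map_cons, List.map_nil, List.foldl_cons, List.foldl_nil]
    have hPt := hP t (by omega)
    have hsuft := hsuf t (by omega)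
    have hPt1 : PySem.List.pyGetD P ((t : Int) + 1) 0 = pvPsum xs (t + 1) := by
      have : (t : Int) + 1 = ((t + 1 : Nat) : Int) := by push_cast; ring
      rw [this, hP (t + 1) (by omega)]
    have hz : ((t : Int) = 0) ↔ (t = 0) := by omega
    have hcond : (PySem.List.pyGetD P (t : Int) 0 < PySem.List.pyGetD suf (t : Int) 0 ∧
        ((t : Int) = 0 ∨ PySem.List.pyGetD P (t : Int) 0 < S + pvH xs t)) ↔ pvBcond xs t := by
      rw [hPt, hsuft, hS, hz]
      unfold pvBcond
      tauto
    have hcount : (((List.range t ++ [t]).countP (fun j => pvBcondB xs j) : Nat) : Int)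
        = ((List.range t).countP (fun j => pvBcondB xs j) : Int)
          + (if pvBcondB xs t then 1 else 0) := by
      rw [List.countP_append]
      simp only [List.countP_cons, List.countP_nil]
      push_cast
      split_ifs <;> simp
    have hpre : (if (t : Int) = 0 then PySem.List.pyGetD P ((t : Int) + 1) 0
        else min (pvH xs t) (PySem.List.pyGetD P ((t : Int) + 1) 0)) = pvH xs (t + 1) := by
      rw [hPt1]
      by_cases h : t = 0
      · subst h; simp [pvH]
      · rw [if_neg (by omega), pvH]
        rw [if_neg h]
    by_cases hb : pvBcond xs t
    · have hbB : pvBcondB xs t = true := (pvBcondB_iff xs t).mpr hb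
      rw [if_pos (hcond.mpr hb), hcount, hbB, hpre]
      simp
    · have hbB : pvBcondB xs t = false :=
        Bool.eq_false_iff.mpr (fun h => hb ((pvBcondB_iff xs t).mp h))
      rw [if_neg (fun hc => hb (hcond.mp hc)), hcount, hbB, hpre]
      simp

theorem pv_B_eq_count (n : Int) (a : List Int) (h0 : 0 < n) (hl : n ≤ (a.length : Int)) :
    good_positions_alt n a =
      (((List.range n.toNat).countP (fun j => pvBcondB (a.take n.toNat) j) : Nat) : Int) := by
  obtain ⟨N, rfl⟩ : ∃ N : Nat, n = (N : Int) := ⟨n.toNat, by omega⟩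
  have hN0 : 0 < N := by omega
  have hNl : N ≤ a.length := by omega
  have hlen : (a.take N).length = N := by rw [List.length_take]; omega
  have htN : ((N : Int)).toNat = N := Int.toNat_natCast N
  rw [htN]
  unfold good_positions_alt
  rw [if_neg (by omega : ¬ (N : Int) ≤ 0)]
  simp only []
  rw [PySem.List.slice_to_natCast]
  rw [pv_foldP (a.take N) [0] (by simp)]
  have hgl : ([0] : List Int).getLast (by simp) = 0 := rfl
  rw [hgl]
  rw [List.singleton_append]
  have hP := fun i hi => pv_P_getD (a.take N) i (by rw [hlen]; exact hi)
  have hSight : PySem.List.pyGetD (0 :: pvPartial 0 (a.take N)) ((N : Int)) 0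
      = pvPsum (a.take N) N := by
    have : ((N : Nat) : Int) = (N : Int) := rfl
    rw [← this, pv_P_getD (a.take N) N (by omega)]
  have hrange : (PySem.List.pyRange ((N : Int) - 1) 0 (-1)).foldl
        (fun suf i => suf ++ [min (PySem.List.pyGetD (0 :: pvPartial 0 (a.take N)) i 0)
          (PySem.List.pyGetD suf (-1) 0)])
        [PySem.List.pyGetD (0 :: pvPartial 0 (a.take N)) ((N : Int)) 0]
      = (List.range N).map (pvG (a.take N)) := by
    rw [hSight]
    have := pv_suf0_build (a.take N) (by omega) (0 :: pvPartial 0 (a.take N))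
      (fun i hi => pv_P_getD (a.take N) i hi)
    rw [hlen] at this
    exact this
  rw [hrange]
  have hrw : PySem.List.pyRange 0 (N : Int) 1 = (List.range N).map (fun k : Nat => (k : Int)) := by
    rw [PySem.List.pyRange_one]
    simp only [sub_zero, zero_add, htN]
  rw [hrw]
  have hloop := pv_loopB (a.take N) (0 :: pvPartial 0 (a.take N))
    ((List.range N).map (pvG (a.take N))).reverse
    (PySem.List.pyGetD (0 :: pvPartial 0 (a.take N)) ((N : Int)) 0)
    (by rw [hSight, hlen])
    (fun i hi => pv_P_getD (a.take N) i (by omega))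
    (fun j hj => by
      have h2 := pv_suf_getD (a.take N) j hj
      rw [show (a.take N).length = N from hlen] at h2 ⊢
      exact h2)
    N (by omega)
  rw [hloop]

theorem pv_psum_succ (xs : List Int) (i : Nat) (h : i < xs.length) :
    pvPsum xs (i + 1) = pvPsum xs i + xs.getD i 0 := by
  unfold pvPsum
  rw [List.take_add_one, List.sum_append]
  congr 1
  rw [List.getD_eq_getElem?_getD]
  simp [List.getElem?_eq_getElem h]

theorem pv_sumSeg (xs : List Int) (j : Nat) :
    ∀ m, j + m ≤ xs.length →
      ((List.range m).map (fun k => xs.getD (j + k) 0)).sum = pvPsum xs (j + m) - pvPsum xs j := by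
  intro m
  induction m with
  | zero => simp
  | succ m ih =>
    intro h
    rw [List.range_succ, List.map_append, List.sum_append]
    rw [ih (by omega)]
    have : j + (m + 1) = (j + m) + 1 := by omega
    rw [this, pv_psum_succ xs (j + m) (by omega)]
    simp
    ring

theorem pv_T_low (xs : List Int) (j m : Nat) (h : j + m ≤ xs.length) :
    pvT xs j m = pvPsum xs (j + m) - pvPsum xs j := by
  unfold pvT
  rw [← pv_sumSeg xs j m h]
  congr 1
  refine List.map_congr_left ?_
  intro k hk
  simp only [List.mem_range] at hk
  rw [Nat.mod_eq_of_lt (by omega)]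

theorem pv_T_split (xs : List Int) (j r : Nat) (hj : j < xs.length)
    (h1 : 1 ≤ r) (h2 : r ≤ j) :
    pvT xs j ((xs.length - j) + r) = pvPsum xs xs.length - pvPsum xs j + pvPsum xs r := by
  unfold pvT
  rw [List.range_add, List.map_append, List.sum_append]
  have hs := pv_sumSeg xs j (xs.length - j) (by omega)
  rw [show j + (xs.length - j) = xs.length by omega] at hs
  have hmap1 : (List.range (xs.length - j)).map (fun k => xs.getD ((j + k) % xs.length) 0)
      = (List.range (xs.length - j)).map (fun k => xs.getD (j + k) 0) := by
    refine List.map_congr_left ?_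
    intro k hk
    simp only [List.mem_range] at hk
    rw [Nat.mod_eq_of_lt (by omega)]
  have hs0 := pv_sumSeg xs 0 r (by omega)
  simp only [Nat.zero_add] at hs0
  have hmap2 : ((List.range r).map (fun k => xs.length - j + k)).map
        (fun k => xs.getD ((j + k) % xs.length) 0)
      = (List.range r).map (fun k => xs.getD k 0) := by
    rw [List.map_map]
    refine List.map_congr_left ?_
    intro t ht
    simp only [List.mem_range] at ht
    simp only [Function.comp_apply]
    rw [show j + (xs.length - j + t) = xs.length + t by omega, Nat.add_mod_left,
      Nat.mod_eq_of_lt (by omega)]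
  rw [hmap1, hs, hmap2, hs0]
  simp [pvPsum]

theorem pv_G_iff (xs : List Int) (c : Int) :
    ∀ t, t < xs.length →
      (c < pvG xs t ↔ ∀ i, xs.length - t ≤ i → i ≤ xs.length → c < pvPsum xs i) := by
  intro t
  induction t with
  | zero =>
    intro _
    simp only [pvG]
    constructor
    · intro h i h1 h2
      have : i = xs.length := by omega
      rwa [this]
    · intro h
      exact h xs.length (by omega) (by omega)
  | succ t ih =>
    intro ht
    simp only [pvG, lt_min_iff]
    rw [ih (by omega)]
    constructor
    · intro ⟨h1, h2⟩ i hi1 hi2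
      by_cases hc : i = xs.length - (t + 1)
      · rwa [hc]
      · exact h2 i (by omega) hi2
    · intro h
      exact ⟨h _ (by omega) (by omega), fun i hi1 hi2 => h i (by omega) hi2⟩

theorem pv_H_iff (xs : List Int) (c : Int) :
    ∀ m, 1 ≤ m →
      (c < pvH xs m ↔ ∀ t, 1 ≤ t → t ≤ m → c < pvPsum xs t) := by
  intro m
  induction m with
  | zero => omega
  | succ m ih =>
    intro _
    by_cases hm : m = 0
    · subst hm
      simp only [pvH, if_pos rfl]
      constructor
      · intro h t h1 h2
        have : t = 1 := by omega
        rwa [this]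
      · intro h; exact h 1 (by omega) (by omega)
    · simp only [pvH, if_neg hm, lt_min_iff]
      rw [ih (by omega)]
      constructor
      · intro ⟨h1, h2⟩ t ht1 ht2
        by_cases hc : t = m + 1
        · rwa [hc]
        · exact h1 t ht1 (by omega)
      · intro h
        exact ⟨fun t ht1 ht2 => h t ht1 (by omega), h (m + 1) (by omega) (by omega)⟩

theorem pv_AB (xs : List Int) (j : Nat) (hj : j < xs.length) :
    pvAgood xs j ↔ pvBcond xs j := by
  set N := xs.length with hN
  unfold pvAgood pvBcond
  rw [pv_G_iff xs (pvPsum xs j) (N - 1 - j) (by omega)]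
  have hNt : N - (N - 1 - j) = j + 1 := by omega
  rw [hNt]
  constructor
  · intro h
    refine ⟨?_, ?_⟩
    · intro i hi1 hi2
      have := h (i - j) (by omega) (by omega)
      rw [pv_T_low xs j (i - j) (by omega)] at this
      have hij : j + (i - j) = i := by omega
      rw [hij] at this
      omega
    · by_cases hj0 : j = 0
      · exact Or.inl hj0
      · refine Or.inr ?_
        have hall : ∀ t, 1 ≤ t → t ≤ j →
            pvPsum xs j - pvPsum xs xs.length < pvPsum xs t := by
          intro t ht1 ht2
          have := h ((N - j) + t) (by omega) (by omega)
          rw [pv_T_split xs j t (by omega) (by omega) (by omega)] at this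
          omega
        have := (pv_H_iff xs (pvPsum xs j - pvPsum xs xs.length) j (by omega)).mpr hall
        omega
  · intro ⟨h1, h2⟩ m hm1 hm2
    by_cases hc : m ≤ N - j
    · rw [pv_T_low xs j m (by omega)]
      have := h1 (j + m) (by omega) (by omega)
      omega
    · have hm : m = (N - j) + (m - (N - j)) := by omega
      rw [hm, pv_T_split xs j (m - (N - j)) (by omega) (by omega) (by omega)]
      rcases h2 with hj0 | h2
      · omega
      · have hall := (pv_H_iff xs (pvPsum xs j - pvPsum xs xs.length) j (by omega)).mp (by omega)
        have := hall (m - (N - j)) (by omega) (by omega)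
        omega

-- ===== VERDICT (by name: the statement is the Claim_ definition above) =====
theorem good_positions_spec : Claim_equal_good_positions := by
  intro n a _ hpre
  unfold Pre_good_positions at hpre
  unfold Spec_good_positions
  by_cases h0 : 0 < n
  · rw [pv_A_eq_count n a h0 hpre, pv_B_eq_count n a h0 hpre]
    congr 1
    refine List.countP_congr ?_
    intro j hj
    simp only [List.mem_range] at hj
    have hlen : (a.take n.toNat).length = n.toNat := by
      rw [List.length_take]; omega
    have h1 := pvAgoodB_iff (a.take n.toNat) j
    have h2 := pvBcondB_iff (a.take n.toNat) j
    have h3 := pv_AB (a.take n.toNat) j (by omega)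
    by_cases hA : pvAgood (a.take n.toNat) j
    · simp [h1.mpr hA, h2.mpr (h3.mp hA)]
    · have hB : ¬ pvBcond (a.take n.toNat) j := fun hb => hA (h3.mpr hb)
      have he : pvAgoodB (a.take n.toNat) j = false :=
        Bool.eq_false_iff.mpr (fun h => hA (h1.mp h))
      have hf : pvBcondB (a.take n.toNat) j = false :=
        Bool.eq_false_iff.mpr (fun h => hB (h2.mp h))
      rw [he, hf]
  · have hn : n ≤ 0 := by omega
    have : PySem.List.pyRange 0 n 1 = [] := PySem.List.pyRange_one_eq_nil (by omega)
    simp [good_positions, good_positions_alt, this, hn]
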